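-- pv_equiv track=rewrite | github.com/hackfeed/python-2nd-sem-labs | BMSTUlab1_3sim_module.py | abs_transform_to_3sim
-- ===== SOURCE A (Python) =====
-- def abs_transform_to_3sim(number):
--     """ Функция перевода числа из десятичной системы счисления
--     в троичносимметричную (по модулю).
--
--     Число переводится из десятичной системы в троичносимметричную
--     посредством последовательного деления десятичного числа на
--     основание новой СС (3). Результат деления записывается
--     записывается в список, который потом реверсится для получения
--     итогового числа.
--
--     Передаваемые параметры:
--     * number - число в десятичной СС
--
--     Возвращаемые значения:
--     * result_number - список из знаков полученного числа (в обратном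
--     порядке)
--
--     """
--
--     result_number = list()
--     number = abs(int(number))
--
--     while number > 0:
--         if number % 3 == 0:
--             result_number.append("0")
--             number //= 3
--         elif number % 3 == 1:
--             result_number.append("+")
--             number //= 3
--         elif number % 3 == 2:
--             result_number.append("-")
--             number = number // 3 + 1
--
--     result_number.reverse()
--
--     return result_number
-- ===== SOURCE B (Python) =====
-- def abs_transform_to_3sim(number):
--     n = abs(int(number))
--     digits = []
--     while n > 0:
--         digits.append(n % 3)
--         n //= 3
--     out = []
--     carry = 0
--     for d in digits:
--         v = d + carry
--         if v == 0:
--             out.append("0")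
--             carry = 0
--         elif v == 1:
--             out.append("+")
--             carry = 0
--         elif v == 2:
--             out.append("-")
--             carry = 1
--         else:
--             out.append("0")
--             carry = 1
--     if carry:
--         out.append("+")
--     out.reverse()
--     return out
-- ===== Notes on version B (the rewrite author's own statement) =====
-- stated objective: alternative
-- what changed: A rebalances digits inline inside a single divide-by-3 loop (adding 1 back to the quotient on remainder 2); B first extracts the plain base-3 digit list least-significant-first and then rebalances it in a separate carry-propagation pass with a possible trailing '+'.
import Mathlib
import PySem

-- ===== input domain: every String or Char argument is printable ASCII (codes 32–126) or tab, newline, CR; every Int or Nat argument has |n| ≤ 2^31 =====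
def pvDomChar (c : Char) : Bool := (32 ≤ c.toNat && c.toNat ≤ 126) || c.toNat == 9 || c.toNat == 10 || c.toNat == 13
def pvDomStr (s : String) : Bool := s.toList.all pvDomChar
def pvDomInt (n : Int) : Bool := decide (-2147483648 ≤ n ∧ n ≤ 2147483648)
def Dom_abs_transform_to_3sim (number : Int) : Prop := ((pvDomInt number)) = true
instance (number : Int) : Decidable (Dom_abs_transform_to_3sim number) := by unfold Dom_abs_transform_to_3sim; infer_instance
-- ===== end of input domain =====

-- B replaces A's single divide-with-inline-rebalance loop by two passes (ordinary base-3
-- digits, then a carry-rebalancing map); objective: alternative decomposition, same cost.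

-- ===== PORT A =====
-- A's while-loop: result_number is the accumulator, appended to on the right; reversed at the end.
def pvALoop (n : Int) (acc : List String) : List String :=
  if _hn : 0 < n then
    if PySem.Int.mod n 3 = 0 then
      pvALoop (PySem.Int.floordiv n 3) (acc ++ ["0"])
    else if PySem.Int.mod n 3 = 1 then
      pvALoop (PySem.Int.floordiv n 3) (acc ++ ["+"])
    else if PySem.Int.mod n 3 = 2 then
      pvALoop (PySem.Int.floordiv n 3 + 1) (acc ++ ["-"])
    else acc  -- unreachable: n % 3 ∈ {0,1,2} for 0 < n
  else acc
termination_by n.toNat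
decreasing_by
  all_goals simp only [PySem.Int.floordiv_eq_ediv_of_pos (by omega : (0:Int) < 3),
    PySem.Int.mod_eq_emod_of_pos (by omega : (0:Int) < 3)] at *
  all_goals omega

def abs_transform_to_3sim (number : Int) : List String :=
  (pvALoop |number| []).reverse

-- ===== PORT B =====
-- pass 1 of Source B: ordinary base-3 digits of n, least-significant first
def pvBDigits (n : Int) : List Int :=
  if _hn : 0 < n then
    PySem.Int.mod n 3 :: pvBDigits (PySem.Int.floordiv n 3)
  else []
termination_by n.toNat
decreasing_by
  simp only [PySem.Int.floordiv_eq_ediv_of_pos (by omega : (0:Int) < 3)]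
  omega

-- pass 2 of Source B: carry-rebalancing walk over the digits; trailing '+' if the carry survives
def pvBCarry (ds : List Int) (carry : Int) : List String :=
  match ds with
  | [] => if carry ≠ 0 then ["+"] else []
  | d :: rest =>
    let v := d + carry
    if v = 0 then "0" :: pvBCarry rest 0
    else if v = 1 then "+" :: pvBCarry rest 0
    else if v = 2 then "-" :: pvBCarry rest 1
    else "0" :: pvBCarry rest 1

def abs_transform_to_3sim_alt (number : Int) : List String :=
  (pvBCarry (pvBDigits |number|) 0).reverse

-- ===== PRECONDITION & SPEC =====
def Spec_abs_transform_to_3sim (number : Int) (out : List String) : Prop := out = abs_transform_to_3sim_alt number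
instance (number : Int) (out : List String) : Decidable (Spec_abs_transform_to_3sim number out) := by unfold Spec_abs_transform_to_3sim; infer_instance

-- ===== CLAIM (what is proved, stated in full; the proofs are below) =====
def Claim_equal_abs_transform_to_3sim : Prop := ∀ (number : Int), Dom_abs_transform_to_3sim number → Spec_abs_transform_to_3sim number (abs_transform_to_3sim number)

-- ===== LEMMAS AND PROOFS =====

-- one unfolding step of A's loop, with mod/floordiv in % , / form
lemma pvALoop_step (n : Int) (acc : List String) (hn : 0 < n) :
    pvALoop n acc =
      if n % 3 = 0 then pvALoop (n / 3) (acc ++ ["0"])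
      else if n % 3 = 1 then pvALoop (n / 3) (acc ++ ["+"])
      else if n % 3 = 2 then pvALoop (n / 3 + 1) (acc ++ ["-"])
      else acc := by
  rw [pvALoop, dif_pos hn,
      PySem.Int.mod_eq_emod_of_pos (by omega : (0:Int) < 3),
      PySem.Int.floordiv_eq_ediv_of_pos (by omega : (0:Int) < 3)]

lemma pvALoop_zero (n : Int) (acc : List String) (hn : ¬ 0 < n) :
    pvALoop n acc = acc := by
  rw [pvALoop, dif_neg hn]

-- A's loop with any accumulator = accumulator ++ loop with empty accumulator
lemma pvALoop_append (k : Nat) : ∀ (n : Int) (acc : List String), n.toNat = k →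
    pvALoop n acc = acc ++ pvALoop n [] := by
  induction k using Nat.strong_induction_on with
  | _ k ih =>
    intro n acc hk
    by_cases hn : 0 < n
    · rw [pvALoop_step n acc hn, pvALoop_step n [] hn]
      have hq : (n / 3).toNat < k := by omega
      split_ifs with h0 h1 h2
      · rw [ih _ hq _ (acc ++ ["0"]) rfl, ih _ hq _ ([] ++ ["0"]) rfl]; simp
      · rw [ih _ hq _ (acc ++ ["+"]) rfl, ih _ hq _ ([] ++ ["+"]) rfl]; simp
      · have hq1 : (n / 3 + 1).toNat < k := by omega
        rw [ih _ hq1 _ (acc ++ ["-"]) rfl, ih _ hq1 _ ([] ++ ["-"]) rfl]; simp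
      · omega
    · rw [pvALoop_zero _ _ hn, pvALoop_zero _ _ hn]; simp

lemma pvALoop_acc (n : Int) (acc : List String) :
    pvALoop n acc = acc ++ pvALoop n [] :=
  pvALoop_append n.toNat n acc rfl

-- core correspondence: the carry pass over the plain base-3 digits of n with carry c ∈ {0,1}
-- equals A's loop started at n + c
lemma pvCore (k : Nat) : ∀ (n c : Int), n.toNat = k → 0 ≤ n → (c = 0 ∨ c = 1) →
    pvBCarry (pvBDigits n) c = pvALoop (n + c) [] := by
  induction k using Nat.strong_induction_on with
  | _ k ih =>
    intro n c hk hn hc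
    by_cases hpos : 0 < n
    · rw [pvBDigits]
      simp only [hpos, dif_pos]
      have h3 : (0:Int) < 3 := by omega
      rw [PySem.Int.mod_eq_emod_of_pos h3, PySem.Int.floordiv_eq_ediv_of_pos h3]
      have hq : ((n / 3).toNat) < k := by omega
      have hq0 : (0:Int) ≤ n / 3 := by omega
      have hr : n % 3 = 0 ∨ n % 3 = 1 ∨ n % 3 = 2 := by omega
      rw [pvBCarry]
      have IH0 := ih _ hq (n / 3) 0 rfl hq0 (Or.inl rfl)
      have IH1 := ih _ hq (n / 3) 1 rfl hq0 (Or.inr rfl)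
      rw [add_zero] at IH0
      have HA0 := pvALoop_acc (n / 3) ["0"]
      have HAp := pvALoop_acc (n / 3) ["+"]
      have HAm := pvALoop_acc (n / 3 + 1) ["-"]
      have HA0' := pvALoop_acc (n / 3 + 1) ["0"]
      rw [pvALoop_step (n + c) [] (by omega)]
      rcases hr with h | h | h <;> rcases hc with hc | hc <;> subst hc
      · simp only [add_zero]; rw [h]; norm_num [HA0, IH0]
      · have hm : (n + 1) % 3 = 1 := by omega
        have hd : (n + 1) / 3 = n / 3 := by omega
        rw [h, hm, hd]; norm_num [HAp, IH0]
      · simp only [add_zero]; rw [h]; norm_num [HAp, IH0]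
      · have hm : (n + 1) % 3 = 2 := by omega
        have hd : (n + 1) / 3 = n / 3 := by omega
        rw [h, hm, hd]; norm_num [HAm, IH1]
      · simp only [add_zero]; rw [h]; norm_num [HAm, IH1]
      · have hm : (n + 1) % 3 = 0 := by omega
        have hd : (n + 1) / 3 = n / 3 + 1 := by omega
        rw [h, hm, hd]; norm_num [HA0', IH1]
    · have hn0 : n = 0 := by omega
      subst hn0
      rw [pvBDigits]
      simp only [lt_irrefl, dite_false]
      rcases hc with hc | hc <;> subst hc
      · rw [pvBCarry, add_zero, pvALoop_zero 0 [] (by omega)]; simp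
      · rw [pvBCarry, zero_add, pvALoop_step 1 [] (by omega)]
        norm_num
        rw [pvALoop_zero _ _ (by omega)]

-- ===== VERDICT (by name: the statement is the Claim_ definition above) =====
theorem abs_transform_to_3sim_spec : Claim_equal_abs_transform_to_3sim := by
  intro number _
  unfold Spec_abs_transform_to_3sim abs_transform_to_3sim abs_transform_to_3sim_alt
  rw [pvCore (|number|).toNat |number| 0 rfl (abs_nonneg number) (Or.inl rfl), add_zero]
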